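-- pv_equiv track=rewrite | github.com/samvalvi/python-lists-loops-programming-exercises | exercises/16-Techno_beat/app.py | lyrics_generator
-- ===== SOURCE A (Python) =====
-- def lyrics_generator (cancion):
--     letra = ""
--     estribillo = 0
--     for item in cancion:
--         if item == 0:
--             letra += "Boom "
--             estribillo = 0
--         elif item == 1:
--             letra += "Drop the base "
--             estribillo += 1
--             if estribillo == 3:
--                 letra += "!!!Break the base!!! "
--     return letra
-- ===== SOURCE B (Python) =====
-- def lyrics_generator(cancion):
--     # Run-based reformulation: keep only the 0/1 codes, walk maximal runs;
--     # a run of zeros emits "Boom " per element, a run of ones of length L emits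
--     # L drops with the break inserted once, right after the third drop.
--     relevant = [x for x in cancion if x == 0 or x == 1]
--     parts = []
--     i, n = 0, len(relevant)
--     while i < n:
--         j = i
--         while j < n and relevant[j] == relevant[i]:
--             j += 1
--         L = j - i
--         if relevant[i] == 1:
--             for k in range(L):
--                 parts.append("Drop the base ")
--                 if k == 2:
--                     parts.append("!!!Break the base!!! ")
--         else:
--             parts.append("Boom " * L)
--         i = j
--     return "".join(parts)
-- ===== Notes on version B (the rewrite author's own statement) =====
-- stated objective: alternative
-- what changed: Replaced A's single stateful pass with a mutating counter by a pre-filter to the 0/1 codes followed by a run-length walk over maximal runs, emitting each run's lyrics as a block (break inserted once after the third drop of a run).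
import Mathlib
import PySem

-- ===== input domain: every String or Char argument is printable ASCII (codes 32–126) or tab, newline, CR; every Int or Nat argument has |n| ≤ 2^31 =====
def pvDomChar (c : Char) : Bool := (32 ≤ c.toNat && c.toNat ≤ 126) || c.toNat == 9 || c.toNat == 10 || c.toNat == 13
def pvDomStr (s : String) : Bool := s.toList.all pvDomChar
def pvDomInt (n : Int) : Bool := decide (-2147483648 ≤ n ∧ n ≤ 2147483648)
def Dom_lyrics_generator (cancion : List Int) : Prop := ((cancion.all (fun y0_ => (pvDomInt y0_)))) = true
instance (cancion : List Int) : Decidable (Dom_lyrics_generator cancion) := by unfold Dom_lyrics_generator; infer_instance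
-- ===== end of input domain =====

-- B rewrites A's stateful counter loop as: filter to the 0/1 codes, then walk maximal
-- runs, emitting "Boom " per zero and, for a run of ones, the drops with the break
-- inserted once after the third (objective: alternative decomposition, same cost).

-- ===== PORT A =====
-- A's loop body: one step of the fold over (letra, estribillo)
def pvStepA (st : String × Int) (item : Int) : String × Int :=
  if item = 0 then (st.1 ++ "Boom ", 0)
  else if item = 1 then
    ((st.1 ++ "Drop the base ") ++ (if st.2 + 1 = 3 then "!!!Break the base!!! " else ""),
     st.2 + 1)
  else st

def lyrics_generator (cancion : List Int) : String :=
  (cancion.foldl pvStepA ("", 0)).1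

-- ===== PORT B =====
-- Source B's run loop: each step consumes one maximal run of equal elements
-- (the inner `while relevant[j] == relevant[i]` is the takeWhile/dropWhile split)
-- and appends its parts; "Boom " * L is joined replication (L ≥ 0, exact).
def pvRunsParts : List Int → List String
  | [] => []
  | x :: xs =>
    let run := xs.takeWhile (fun y => y == x)
    let rest := xs.dropWhile (fun y => y == x)
    let L := run.length + 1
    (if x = 1 then
      (List.range L).map
        (fun k => "Drop the base " ++ (if k = 2 then "!!!Break the base!!! " else ""))
     else [String.join (List.replicate L "Boom ")]) ++ pvRunsParts rest
  termination_by l => l.length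
  decreasing_by
    simpa using Nat.lt_succ_of_le (List.length_dropWhile_le (fun y => y == x) xs)

def lyrics_generator_alt (cancion : List Int) : String :=
  String.join (pvRunsParts (cancion.filter (fun x => x == 0 || x == 1)))

-- ===== PRECONDITION & SPEC =====
def Spec_lyrics_generator (cancion : List Int) (out : String) : Prop := out = lyrics_generator_alt cancion
instance (cancion : List Int) (out : String) : Decidable (Spec_lyrics_generator cancion out) := by unfold Spec_lyrics_generator; infer_instance

-- ===== CLAIM (what is proved, stated in full; the proofs are below) =====
def Claim_equal_lyrics_generator : Prop := ∀ (cancion : List Int), Dom_lyrics_generator cancion → Spec_lyrics_generator cancion (lyrics_generator cancion)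

-- ===== LEMMAS AND PROOFS =====

theorem pvJoin_nil : String.join ([] : List String) = "" := rfl

theorem pvJoin_cons (a : String) (l : List String) :
    String.join (a :: l) = a ++ String.join l := by
  have h : ∀ (l : List String) (a : String),
      List.foldl (fun r s => r ++ s) a l = a ++ List.foldl (fun r s => r ++ s) "" l := by
    intro l
    induction l with
    | nil => intro a; simp
    | cons b bs ih =>
      intro a
      simp only [List.foldl_cons]
      rw [ih (a ++ b), ih ("" ++ b), String.append_assoc]
      simp
  simp only [String.join, List.foldl_cons]
  rw [h l ("" ++ a)]
  simp

theorem pvJoin_append (l1 l2 : List String) :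
    String.join (l1 ++ l2) = String.join l1 ++ String.join l2 := by
  induction l1 with
  | nil => simp [pvJoin_nil]
  | cons a l ih => rw [List.cons_append, pvJoin_cons, pvJoin_cons, ih, String.append_assoc]

-- non-0/1 items are skipped by A's loop, so the fold passes to the filtered list
theorem pvFoldA_filter (l : List Int) (st : String × Int) :
    l.foldl pvStepA st = (l.filter (fun x => x == 0 || x == 1)).foldl pvStepA st := by
  induction l generalizing st with
  | nil => rfl
  | cons x xs ih =>
    by_cases h0 : x = 0
    · simp [h0, ih]
    · by_cases h1 : x = 1
      · simp [h1, ih]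
      · simp [h0, h1, pvStepA, ih]

-- fold over a block of ones starting with counter k: drops with the break at k+i+1 = 3
theorem pvFoldA_ones (run : List Int) (h : ∀ y ∈ run, y = 1) (s : String) (k : Int) :
    run.foldl pvStepA (s, k) =
      (s ++ String.join ((List.range run.length).map
        (fun i : Nat => "Drop the base " ++ (if k + (i : Int) = 2 then "!!!Break the base!!! " else ""))),
       k + (run.length : Int)) := by
  induction run generalizing s k with
  | nil => simp [pvJoin_nil]
  | cons y ys ih =>
    have hy : y = 1 := h y List.mem_cons_self
    have hys : ∀ z ∈ ys, z = 1 := fun z hz => h z (List.mem_cons_of_mem _ hz)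
    subst hy
    have hstep : pvStepA (s, k) 1 =
        ((s ++ "Drop the base ") ++ (if k + 1 = 3 then "!!!Break the base!!! " else ""), k + 1) := by
      simp [pvStepA]
    rw [List.foldl_cons, hstep, ih hys]
    refine Prod.ext ?_ (by simp; ring)
    simp only [List.length_cons, List.range_succ_eq_map, List.map_cons, List.map_map]
    rw [pvJoin_cons]
    have hcond : (k + ((0 : Nat) : Int) = 2) = (k + 1 = 3) := by
      simp only [eq_iff_iff]; omega
    have hmap : (List.range ys.length).map
          ((fun i : Nat => "Drop the base " ++ (if k + (i : Int) = 2 then "!!!Break the base!!! " else "")) ∘ Nat.succ)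
        = (List.range ys.length).map
          (fun i : Nat => "Drop the base " ++ (if (k + 1) + (i : Int) = 2 then "!!!Break the base!!! " else "")) := by
      apply List.map_congr_left
      intro i _
      simp only [Function.comp]
      congr 2
      simp only [eq_iff_iff]
      push_cast
      omega
    rw [hmap]
    simp only [hcond]
    simp [String.append_assoc]

-- fold over a block of zeros (head included): Booms, counter reset to 0
theorem pvFoldA_zeros (run : List Int) (h : ∀ y ∈ run, y = 0) (s : String) (c : Int) :
    (0 :: run).foldl pvStepA (s, c) =
      (s ++ String.join (List.replicate (run.length + 1) "Boom "), 0) := by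
  induction run generalizing s c with
  | nil => simp [pvStepA, pvJoin_cons, pvJoin_nil]
  | cons y ys ih =>
    have hy : y = 0 := h y List.mem_cons_self
    have hys : ∀ z ∈ ys, z = 0 := fun z hz => h z (List.mem_cons_of_mem _ hz)
    subst hy
    have hstep : pvStepA (s, c) 0 = (s ++ "Boom ", 0) := by simp [pvStepA]
    have h2 : ((0 : Int) :: 0 :: ys).foldl pvStepA (s, c)
        = ((0 : Int) :: ys).foldl pvStepA (s ++ "Boom ", 0) := by
      simp only [List.foldl_cons, hstep]
    rw [h2, ih hys]
    simp [List.replicate_succ, pvJoin_cons, String.append_assoc]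

theorem pvDropWhile_head_false {p : Int → Bool} {l : List Int} {x : Int} {xs : List Int}
    (h : l.dropWhile p = x :: xs) : p x = false := by
  induction l with
  | nil => simp at h
  | cons a as ih =>
    rw [List.dropWhile_cons] at h
    split at h
    · exact ih h
    · cases h; simp_all

-- main invariant: on a 0/1-only list, A's fold from counter 0 (or with a 0 ahead)
-- produces exactly the concatenation of B's run parts
theorem pvMainAux (n : Nat) : ∀ (fl : List Int), fl.length ≤ n →
    (∀ y ∈ fl, y = 0 ∨ y = 1) → ∀ (s : String) (c : Int),
    (c = 0 ∨ fl.head? = some 0) →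
    (fl.foldl pvStepA (s, c)).1 = s ++ String.join (pvRunsParts fl) := by
  induction n with
  | zero =>
    intro fl hlen _ s c _
    have : fl = [] := List.eq_nil_of_length_eq_zero (Nat.le_zero.mp hlen)
    subst this
    simp [pvRunsParts, pvJoin_nil]
  | succ n ih =>
    intro fl hlen hall s c hc
    match fl with
    | [] => simp [pvRunsParts, pvJoin_nil]
    | x :: xs =>
      have hx : x = 0 ∨ x = 1 := hall x List.mem_cons_self
      have hxs : ∀ y ∈ xs, y = 0 ∨ y = 1 := fun y hy => hall y (List.mem_cons_of_mem _ hy)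
      have hxslen : xs.length ≤ n := by simp at hlen; omega
      rcases hx with hx0 | hx1
      · -- zero run
        subst hx0
        have hz : ∀ y ∈ xs.takeWhile (fun y => y == (0 : Int)), y = 0 := by
          intro y hy
          simpa using List.mem_takeWhile_imp hy
        have hcons : (0 : Int) :: xs
            = ((0 : Int) :: xs.takeWhile (fun y => y == (0 : Int))) ++ xs.dropWhile (fun y => y == (0 : Int)) := by
          rw [List.cons_append, List.takeWhile_append_dropWhile]
        have hrestlen : (xs.dropWhile (fun y => y == (0 : Int))).length ≤ n :=
          le_trans (List.length_dropWhile_le _ _) hxslen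
        have hrestall : ∀ y ∈ xs.dropWhile (fun y => y == (0 : Int)), y = 0 ∨ y = 1 :=
          fun y hy => hxs y ((List.dropWhile_sublist _).mem hy)
        conv_lhs => rw [hcons]
        rw [List.foldl_append, pvFoldA_zeros _ hz s c,
            ih _ hrestlen hrestall _ 0 (Or.inl rfl)]
        rw [show pvRunsParts ((0 : Int) :: xs)
              = [String.join (List.replicate ((xs.takeWhile (fun y => y == (0 : Int))).length + 1) "Boom ")]
                ++ pvRunsParts (xs.dropWhile (fun y => y == (0 : Int))) from by
          rw [pvRunsParts]; simp]
        rw [pvJoin_append, pvJoin_cons, pvJoin_nil, String.append_assoc]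
        simp
      · -- ones run
        subst hx1
        have hc0 : c = 0 := by
          rcases hc with h | h
          · exact h
          · simp at h
        subst hc0
        have hone : ∀ y ∈ (1 : Int) :: xs.takeWhile (fun y => y == (1 : Int)), y = 1 := by
          intro y hy
          rcases List.mem_cons.mp hy with h | h
          · exact h
          · simpa using List.mem_takeWhile_imp h
        have hcons : (1 : Int) :: xs
            = ((1 : Int) :: xs.takeWhile (fun y => y == (1 : Int))) ++ xs.dropWhile (fun y => y == (1 : Int)) := by
          rw [List.cons_append, List.takeWhile_append_dropWhile]
        have hrestlen : (xs.dropWhile (fun y => y == (1 : Int))).length ≤ n :=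
          le_trans (List.length_dropWhile_le _ _) hxslen
        have hrestall : ∀ y ∈ xs.dropWhile (fun y => y == (1 : Int)), y = 0 ∨ y = 1 :=
          fun y hy => hxs y ((List.dropWhile_sublist _).mem hy)
        have hresthead : xs.dropWhile (fun y => y == (1 : Int)) = []
            ∨ (xs.dropWhile (fun y => y == (1 : Int))).head? = some 0 := by
          cases hr : xs.dropWhile (fun y => y == (1 : Int)) with
          | nil => exact Or.inl rfl
          | cons r rs =>
            have hrne : (r == (1 : Int)) = false := pvDropWhile_head_false (p := fun y => y == (1 : Int)) hr
            have hr01 : r = 0 ∨ r = 1 := hrestall r (by rw [hr]; exact List.mem_cons_self)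
            have hr0 : r = 0 := by
              rcases hr01 with h | h
              · exact h
              · subst h; simp at hrne
            subst hr0
            exact Or.inr rfl
        conv_lhs => rw [hcons]
        rw [List.foldl_append, pvFoldA_ones _ hone s 0]
        have hrest1 : ((xs.dropWhile (fun y => y == (1 : Int))).foldl pvStepA
            (s ++ String.join ((List.range ((1 : Int) :: xs.takeWhile (fun y => y == (1 : Int))).length).map
              (fun i : Nat => "Drop the base " ++ (if 0 + (i : Int) = 2 then "!!!Break the base!!! " else ""))),
             0 + (((1 : Int) :: xs.takeWhile (fun y => y == (1 : Int))).length : Int))).1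
            = (s ++ String.join ((List.range ((1 : Int) :: xs.takeWhile (fun y => y == (1 : Int))).length).map
              (fun i : Nat => "Drop the base " ++ (if 0 + (i : Int) = 2 then "!!!Break the base!!! " else ""))))
              ++ String.join (pvRunsParts (xs.dropWhile (fun y => y == (1 : Int)))) := by
          rcases hresthead with hnil | hhead
          · rw [hnil]; simp [pvRunsParts, pvJoin_nil]
          · exact ih _ hrestlen hrestall _ _ (Or.inr hhead)
        rw [hrest1]
        rw [show pvRunsParts ((1 : Int) :: xs)
              = ((List.range ((xs.takeWhile (fun y => y == (1 : Int))).length + 1)).map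
                  (fun k => "Drop the base " ++ (if k = 2 then "!!!Break the base!!! " else "")))
                ++ pvRunsParts (xs.dropWhile (fun y => y == (1 : Int))) from by
          rw [pvRunsParts]; simp]
        have hmap : (List.range ((xs.takeWhile (fun y => y == (1 : Int))).length + 1)).map
              (fun i : Nat => "Drop the base " ++ (if 0 + (i : Int) = 2 then "!!!Break the base!!! " else ""))
            = (List.range ((xs.takeWhile (fun y => y == (1 : Int))).length + 1)).map
              (fun k => "Drop the base " ++ (if k = 2 then "!!!Break the base!!! " else "")) := by
          apply List.map_congr_left
          intro i _
          congr 2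
          simp only [eq_iff_iff]
          omega
        rw [pvJoin_append, String.append_assoc]
        simp only [List.length_cons]
        rw [hmap]

theorem pvMain (fl : List Int) (hall : ∀ y ∈ fl, y = 0 ∨ y = 1) (s : String) :
    (fl.foldl pvStepA (s, 0)).1 = s ++ String.join (pvRunsParts fl) :=
  pvMainAux fl.length fl le_rfl hall s 0 (Or.inl rfl)

-- ===== VERDICT (by name: the statement is the Claim_ definition above) =====
theorem lyrics_generator_spec : Claim_equal_lyrics_generator := by
  intro cancion _
  unfold Spec_lyrics_generator lyrics_generator lyrics_generator_alt
  rw [pvFoldA_filter]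
  have hall : ∀ y ∈ cancion.filter (fun x => x == 0 || x == 1), y = 0 ∨ y = 1 := by
    intro y hy
    have := List.of_mem_filter hy
    simpa using this
  rw [pvMain _ hall ""]
  simp
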